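-- pv_equiv track=rewrite | github.com/thumbe12856/competitive-programming | cf/_contest/108_Div2/3/solve.py | solve
-- ===== SOURCE A (Python) =====
-- from collections import defaultdict
--
-- def solve(N, classes, ability):
--     can = set()
--     data = defaultdict(list)
--     for i in range(N):
--         c = classes[i]
--         a = ability[i]
--         can.add(c)
--         data[c].append(a)
--
--     presum = defaultdict(list)
--     for c in data:
--         data[c].sort(reverse=True)
--         last = 0
--         presum[c] = [0] * (len(data[c]))
--         for i in range(len(data[c])):
--             presum[c][i] = last + data[c][i]
--             last = presum[c][i]
--
--     ans = []
--     for i in range(1, N + 1, 1):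
--         total = 0
--         del_can = set()
--         for c in can:
--             val = len(data[c]) % i + 1
--             if val > len(data[c]):
--                 del_can.add(c)
--             else:
--                 total += presum[c][-val]
--
--         for d in del_can:
--             can.discard(d)
--
--         ans.append(str(total))
--
--     return (" ").join(ans)
-- ===== SOURCE B (Python) =====
-- from collections import defaultdict
--
-- def solve(N, classes, ability):
--     # Group abilities by class (raises IndexError just like A when N exceeds the lists).
--     groups = defaultdict(list)
--     for i in range(N):
--         groups[classes[i]].append(ability[i])
--
--     ans = [0] * N
--     for lst in groups.values():
--         lst.sort(reverse=True)
--         prefix = []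
--         s = 0
--         for a in lst:
--             s += a
--             prefix.append(s)
--         L = len(lst)
--         # a class of size L contributes, for every team size i <= L,
--         # the sum of its top (L // i) * i members
--         for i in range(1, L + 1):
--             ans[i - 1] += prefix[(L // i) * i - 1]
--
--     return " ".join(str(x) for x in ans)
-- ===== Notes on version B (the rewrite author's own statement) =====
-- stated objective: faster
-- what changed: B flips A's loop nesting: instead of iterating team sizes i=1..N while scanning and pruning a live set of classes (rebuilding it through per-element discards), B iterates once over the grouped classes and scatter-adds each class's prefix-sum contribution for every size i<=L into a preallocated answer array, eliminating the can/del_can pruning sets entirely.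
import Mathlib
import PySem

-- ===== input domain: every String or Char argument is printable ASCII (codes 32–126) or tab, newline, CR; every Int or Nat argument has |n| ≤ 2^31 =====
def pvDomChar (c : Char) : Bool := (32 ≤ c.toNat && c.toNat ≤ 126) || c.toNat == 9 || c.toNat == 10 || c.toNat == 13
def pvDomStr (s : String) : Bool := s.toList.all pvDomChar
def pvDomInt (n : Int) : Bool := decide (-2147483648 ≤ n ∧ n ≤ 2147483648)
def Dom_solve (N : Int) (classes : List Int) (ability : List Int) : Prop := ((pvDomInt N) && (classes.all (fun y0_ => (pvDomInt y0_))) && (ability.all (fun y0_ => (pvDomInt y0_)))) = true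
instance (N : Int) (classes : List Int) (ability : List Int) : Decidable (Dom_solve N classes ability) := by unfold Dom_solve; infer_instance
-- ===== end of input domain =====

-- B re-groups the data once and scatter-adds each class's prefix-sum contribution for
-- every team size i ≤ L into a preallocated answer array, instead of A's per-size scan
-- over a shrinking live set of classes (alternative decomposition, same results).
-- (A sorts its per-class lists in place; the equivalence proved here is about the return value.)

-- ===== PORT A =====
-- helper: A's inner presum loop — presum[c] = [0]*len; for i in range(len): presum[c][i] = last + data[c][i]; last = presum[c][i]
def presumOf (dc : List Int) : List Int :=
  ((PySem.List.pyRange 0 (dc.length : Int) 1).foldl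
     (fun (q : List Int × Int) i =>
       (PySem.List.pySetD q.1 i (q.2 + PySem.List.pyGetD dc i 0),
        q.2 + PySem.List.pyGetD dc i 0))
     (List.replicate dc.length (0 : Int), 0)).1

-- helper: A's phase-3 loop body (one team size i): one pass over `can` accumulating
-- (total, del_can), then discarding del_can from can and appending str(total).
def stepA3 (D P : PySem.Dict Int (List Int)) (st : PySem.Set Int × List String) (i : Int) :
    PySem.Set Int × List String :=
  let inner := st.1.foldl
    (fun (q : Int × PySem.Set Int) c =>
      if ((D.getD c []).length : Int) < PySem.Int.mod ((D.getD c []).length : Int) i + 1 then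
        (q.1, PySem.Set.add q.2 c)
      else
        (q.1 + PySem.List.pyGetD (P.getD c [])
           (-(PySem.Int.mod ((D.getD c []).length : Int) i + 1)) 0, q.2))
    (0, PySem.Set.empty)
  (inner.2.foldl (fun s d => PySem.Set.discard s d) st.1,
   st.2 ++ [PySem.Int.toStr inner.1])

-- list indexing that Pre_solve guarantees in range is ported as pyGetD/pySetD (defaults
-- never read inside Pre_); the Python set's hash iteration order is not modelled — it is
-- consumed only for an (order-insensitive) sum and set rebuilding, as PYSEM.md allows.
def solve (N : Int) (classes : List Int) (ability : List Int) : String :=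
  let st1 :=
    (PySem.List.pyRange 0 N 1).foldl
      (fun (st : PySem.Set Int × PySem.Dict Int (List Int)) i =>
        (PySem.Set.add st.1 (PySem.List.pyGetD classes i 0),
         st.2.modify (PySem.List.pyGetD classes i 0) []
           (fun l => l ++ [PySem.List.pyGetD ability i 0])))
      (PySem.Set.empty, PySem.Dict.empty)
  let st2 :=
    st1.2.keys.foldl
      (fun (st : PySem.Dict Int (List Int) × PySem.Dict Int (List Int)) c =>
        (st.1.insert c (PySem.List.sorted (st.1.getD c []) (fun x => x) true),
         st.2.insert c (presumOf (PySem.List.sorted (st.1.getD c []) (fun x => x) true))))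
      (st1.2, PySem.Dict.empty)
  let fin := (PySem.List.pyRange 1 (N + 1) 1).foldl (stepA3 st2.1 st2.2) (st1.1, [])
  PySem.Str.join " " fin.2

-- ===== PORT B =====
-- helper: B's per-class body — sort descending, build the running prefix list by
-- appending, then add prefix[(L//i)*i - 1] into ans[i-1] for each i = 1..L.
def stepB (ans : List Int) (lst0 : List Int) : List Int :=
  let lst := PySem.List.sorted lst0 (fun x => x) true
  let pr := (lst.foldl (fun (q : List Int × Int) a => (q.1 ++ [q.2 + a], q.2 + a)) ([], 0)).1
  let L : Int := (lst.length : Int)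
  (PySem.List.pyRange 1 (L + 1) 1).foldl
    (fun ans i =>
      PySem.List.pySetD ans (i - 1)
        (PySem.List.pyGetD ans (i - 1) 0 +
         PySem.List.pyGetD pr (PySem.Int.floordiv L i * i - 1) 0))
    ans

def solve_alt (N : Int) (classes : List Int) (ability : List Int) : String :=
  let groups :=
    (PySem.List.pyRange 0 N 1).foldl
      (fun (g : PySem.Dict Int (List Int)) i =>
        g.modify (PySem.List.pyGetD classes i 0) []
          (fun l => l ++ [PySem.List.pyGetD ability i 0]))
      PySem.Dict.empty
  let ans := groups.values.foldl stepB (List.replicate N.toNat (0 : Int))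
  PySem.Str.join " " (ans.map PySem.Int.toStr)

-- ===== PRECONDITION & SPEC =====
-- Pre_solve excludes exactly the inputs where A (and B) raise IndexError: N larger than
-- either input list.
def Pre_solve (N : Int) (classes : List Int) (ability : List Int) : Prop :=
  N ≤ (classes.length : Int) ∧ N ≤ (ability.length : Int)
instance (N : Int) (classes : List Int) (ability : List Int) : Decidable (Pre_solve N classes ability) := by unfold Pre_solve; infer_instance
def pvWitness_solve : Int × List Int × List Int := (3, [1, 1, 2], [5, 3, 4])

def Spec_solve (N : Int) (classes : List Int) (ability : List Int) (out : String) : Prop := out = solve_alt N classes ability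
instance (N : Int) (classes : List Int) (ability : List Int) (out : String) : Decidable (Spec_solve N classes ability out) := by unfold Spec_solve; infer_instance

-- ===== CLAIM (what is proved, stated in full; the proofs are below) =====
def Claim_equal_solve : Prop := ∀ (N : Int) (classes : List Int) (ability : List Int), Dom_solve N classes ability → Pre_solve N classes ability → Spec_solve N classes ability (solve N classes ability)

-- ===== LEMMAS AND PROOFS =====

-- running prefix sums (the common value both ports' prefix loops compute)
def pfx : List Int → Int → List Int
  | [], _ => []
  | a :: t, s => (s + a) :: pfx t (s + a)

-- the contribution of a class with member list ls to team size i (0 when i > |ls|)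
def contrib (ls : List Int) (i : Int) : Int :=
  if (ls.length : Int) < PySem.Int.mod (ls.length : Int) i + 1 then 0
  else PySem.List.pyGetD (pfx (PySem.List.sorted ls (fun x => x) true) 0)
         (-(PySem.Int.mod (ls.length : Int) i + 1)) 0

theorem length_pfx (l : List Int) (s : Int) : (pfx l s).length = l.length := by
  induction l generalizing s with
  | nil => rfl
  | cons a t ih => simp [pfx, ih]

theorem pfx_append_singleton (l : List Int) (a s : Int) :
    pfx (l ++ [a]) s = pfx l s ++ [s + l.sum + a] := by
  induction l generalizing s with
  | nil => simp [pfx]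
  | cons b t ih => simp [pfx, ih, add_assoc]

-- B's append-style prefix loop computes pfx
theorem foldl_pfx (ls : List Int) (acc : List Int) (s : Int) :
    ls.foldl (fun (q : List Int × Int) a => (q.1 ++ [q.2 + a], q.2 + a)) (acc, s)
      = (acc ++ pfx ls s, s + ls.sum) := by
  induction ls generalizing acc s with
  | nil => simp [pfx]
  | cons a t ih => simp [pfx, ih, add_assoc]

-- A's set-into-zeros prefix loop computes pfx as well
theorem presum_loop (dc : List Int) :
    ∀ (k : Nat), k ≤ dc.length →
      (PySem.List.pyRange 0 (k : Int) 1).foldl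
        (fun (q : List Int × Int) i =>
          (PySem.List.pySetD q.1 i (q.2 + PySem.List.pyGetD dc i 0),
           q.2 + PySem.List.pyGetD dc i 0))
        (List.replicate dc.length (0 : Int), 0)
      = (pfx (dc.take k) 0 ++ List.replicate (dc.length - k) 0, (dc.take k).sum) := by
  intro k
  induction k with
  | zero => intro _; simp [pfx]
  | succ k ih =>
    intro hk
    have hk' : k ≤ dc.length := Nat.le_of_succ_le hk
    have hcast : ((k + 1 : Nat) : Int) = (k : Int) + 1 := by push_cast; ring
    rw [hcast, PySem.List.pyRange_one_succ_right (by positivity), List.foldl_append,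
        ih hk', List.foldl_cons, List.foldl_nil]
    have hklt : k < dc.length := hk
    have hget : PySem.List.pyGetD dc (k : Int) 0 = dc[k] := by
      rw [PySem.List.pyGetD_natCast, List.getD_eq_getElem _ _ hklt]
    have hlen1 : (pfx (dc.take k) 0).length = k := by
      rw [length_pfx, List.length_take]; omega
    have hset : PySem.List.pySetD (pfx (dc.take k) 0 ++ List.replicate (dc.length - k) 0)
        (k : Int) ((dc.take k).sum + PySem.List.pyGetD dc (k : Int) 0)
        = pfx (dc.take (k+1)) 0 ++ List.replicate (dc.length - (k+1)) 0 := by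
      rw [PySem.List.pySetD, PySem.List.pySet?_natCast _ _ _ (by simp [hlen1]; omega),
          Option.getD_some, List.set_append, if_neg (by omega)]
      have hrep : dc.length - k = (dc.length - (k+1)) + 1 := by omega
      have hsetr : (List.replicate (dc.length - k) (0:Int)).set (k - (pfx (dc.take k) 0).length)
          ((dc.take k).sum + PySem.List.pyGetD dc (k : Int) 0)
          = ((dc.take k).sum + PySem.List.pyGetD dc (k : Int) 0) :: List.replicate (dc.length - (k+1)) 0 := by
        rw [hlen1, Nat.sub_self, hrep, List.replicate_succ, List.set_cons_zero]
      rw [hsetr, List.take_add_one, List.getElem?_eq_getElem hklt]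
      simp only [Option.toList_some, pfx_append_singleton, zero_add, hget]
      simp
    rw [hset, List.take_add_one, List.getElem?_eq_getElem hklt]
    simp [hget]
    rw [List.sum_take_succ _ _ hklt]

theorem presumOf_eq_pfx (dc : List Int) : presumOf dc = pfx dc 0 := by
  rw [presumOf, presum_loop dc dc.length le_rfl]
  simp

-- the deletion test `len % i + 1 > len` is exactly `len < i`
theorem cond_iff (L i : Int) (hL : 0 ≤ L) (hi : 1 ≤ i) :
    (L < PySem.Int.mod L i + 1) ↔ L < i := by
  rw [PySem.Int.mod_eq_emod_of_pos (by omega)]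
  rcases lt_or_ge L i with h | h
  · rw [Int.emod_eq_of_lt hL h]; omega
  · have h1 : L % i < i := Int.emod_lt_of_pos _ (by omega)
    have h2 : 0 ≤ L % i := Int.emod_nonneg _ (by omega)
    constructor <;> intro hh <;> omega

-- python's negative indexing for 1 ≤ v ≤ len
theorem pyGetD_neg (xs : List Int) (v : Int) (d : Int)
    (h1 : 1 ≤ v) (h2 : v ≤ (xs.length : Int)) :
    PySem.List.pyGetD xs (-v) d = PySem.List.pyGetD xs ((xs.length : Int) - v) d := by
  simp only [PySem.List.pyGetD, PySem.List.pyGet?, PySem.List.pyIdx?]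
  split_ifs <;> try omega
  have h : xs.length - (- -v).toNat = ((xs.length : Int) - v).toNat := by omega
  rw [h]

-- membership through a conditional Set.add loop (del_can)
theorem mem_foldl_add_if (l : List Int) (p : Int → Prop) [DecidablePred p] :
    ∀ (s : PySem.Set Int) (x : Int),
      x ∈ l.foldl (fun s c => if p c then PySem.Set.add s c else s) s
        ↔ x ∈ s ∨ (x ∈ l ∧ p x) := by
  induction l with
  | nil => simp
  | cons a t ih =>
    intro s x
    simp only [List.foldl_cons, ih]
    by_cases hp : p a
    · simp only [hp, if_pos, PySem.Set.mem_add]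
      constructor
      · rintro (⟨h|h⟩|h)
        · exact Or.inl h
        · exact Or.inr ⟨by simp [h], by rwa [h]⟩
        · exact Or.inr ⟨List.mem_cons_of_mem _ h.1, h.2⟩
      · rintro (h|⟨hm,hx⟩)
        · exact Or.inl (Or.inl h)
        · rcases List.mem_cons.mp hm with h|h
          · exact Or.inl (Or.inr h)
          · exact Or.inr ⟨h, hx⟩
    · rw [if_neg hp]
      constructor
      · rintro (h|h)
        · exact Or.inl h
        · exact Or.inr ⟨List.mem_cons_of_mem _ h.1, h.2⟩
      · rintro (h|⟨hm,hx⟩)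
        · exact Or.inl h
        · rcases List.mem_cons.mp hm with h|h
          · subst h; exact absurd hx hp
          · exact Or.inr ⟨h, hx⟩

-- a fold of discards is a filter
theorem foldl_discard (ds : List Int) :
    ∀ (s : PySem.Set Int),
      ds.foldl (fun s d => PySem.Set.discard s d) s
        = s.filter (fun y => !(ds.contains y)) := by
  induction ds with
  | nil => intro s; simp
  | cons a t ih =>
    intro s
    rw [List.foldl_cons, ih]
    simp only [PySem.Set.discard, List.filter_filter]
    apply List.filter_congr
    intro x _
    by_cases hxa : x = a
    · subst hxa; simp
    · simp [hxa]

-- sum over a filtered list extends to the full list when dropped elements map to 0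
theorem sum_filter_ext (l : List Int) (q : Int → Bool) (g : Int → Int)
    (h : ∀ x ∈ l, q x = false → g x = 0) :
    ((l.filter q).map g).sum = (l.map g).sum := by
  induction l with
  | nil => rfl
  | cons a t ih =>
    have ih' := ih (fun x hx => h x (List.mem_cons_of_mem _ hx))
    by_cases hq : q a = true
    · simp [hq, ih']
    · have := h a (List.mem_cons_self ..) (by simpa using hq)
      simp [hq, ih', this]

-- reading back an insert-once-per-key fold (A's phase 2)
theorem foldl_insert_read (F G : List Int → List Int) :
    ∀ (l : List Int) (d p : PySem.Dict Int (List Int)), l.Nodup →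
      ∀ c,
        ((l.foldl (fun st c =>
            (st.1.insert c (F (st.1.getD c [])), st.2.insert c (G (st.1.getD c []))))
          (d, p)).1.getD c [] = if c ∈ l then F (d.getD c []) else d.getD c [])
        ∧ ((l.foldl (fun st c =>
            (st.1.insert c (F (st.1.getD c [])), st.2.insert c (G (st.1.getD c []))))
          (d, p)).2.getD c [] = if c ∈ l then G (d.getD c []) else p.getD c []) := by
  intro l
  induction l with
  | nil => intro d p _ c; simp
  | cons a t ih =>
    intro d p hnd c
    have hat : a ∉ t := (List.nodup_cons.mp hnd).1
    have hndt : t.Nodup := (List.nodup_cons.mp hnd).2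
    rw [List.foldl_cons]
    have IH := ih (d.insert a (F (d.getD a []))) (p.insert a (G (d.getD a []))) hndt c
    by_cases hc : c = a
    · subst hc
      rw [(IH.1.trans (by rw [if_neg hat])), (IH.2.trans (by rw [if_neg hat]))]
      simp
    · by_cases hct : c ∈ t
      · constructor
        · rw [IH.1, if_pos hct, if_pos (List.mem_cons_of_mem _ hct),
              PySem.Dict.getD_insert, if_neg hc]
        · rw [IH.2, if_pos hct, if_pos (List.mem_cons_of_mem _ hct),
              PySem.Dict.getD_insert, if_neg hc]
      · have hcl : c ∉ a :: t := by simp [hc, hct]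
        constructor
        · rw [IH.1, if_neg hct, if_neg hcl, PySem.Dict.getD_insert, if_neg hc]
        · rw [IH.2, if_neg hct, if_neg hcl, PySem.Dict.getD_insert, if_neg hc]

-- B's inner scatter loop, pointwise
theorem innerB (w : Int → Int) :
    ∀ (L : Nat) (ans : List Int), L ≤ ans.length →
      (PySem.List.pyRange 1 ((L : Int) + 1) 1).foldl
        (fun a i => PySem.List.pySetD a (i - 1) (PySem.List.pyGetD a (i - 1) 0 + w i)) ans
      = ans.mapIdx (fun j x => if j + 1 ≤ L then x + w ((j : Int) + 1) else x) := by
  intro L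
  induction L with
  | zero =>
    intro ans _
    rw [show ((0 : Nat) : Int) + 1 = 1 by norm_num, PySem.List.pyRange_one_eq_nil le_rfl,
        List.foldl_nil]
    apply List.ext_getElem?
    intro i
    simp [List.getElem?_mapIdx]
  | succ L ih =>
    intro ans hL
    have hL' : L ≤ ans.length := by omega
    have hcast : ((L + 1 : Nat) : Int) + 1 = ((L : Int) + 1) + 1 := by push_cast; ring
    rw [hcast, PySem.List.pyRange_one_succ_right (by omega), List.foldl_append,
        ih ans hL', List.foldl_cons, List.foldl_nil]
    have hlen : (ans.mapIdx (fun j x => if j + 1 ≤ L then x + w ((j : Int) + 1) else x)).length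
        = ans.length := List.length_mapIdx
    have hidx : ((L : Int) + 1 - 1) = ((L : Nat) : Int) := by ring
    rw [hidx]
    have hLlt : L < ans.length := by omega
    rw [PySem.List.pyGetD_natCast, PySem.List.pySetD,
        PySem.List.pySet?_natCast _ _ _ (by rw [hlen]; omega), Option.getD_some]
    apply List.ext_getElem?
    intro j
    rw [List.getElem?_set]
    by_cases hj : L = j
    · subst hj
      rw [if_pos rfl, if_pos (by rw [hlen]; omega)]
      rw [List.getD_eq_getElem?_getD, List.getElem?_mapIdx, List.getElem?_eq_getElem hLlt]
      simp only [Option.map_some, Option.getD_some]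
      rw [if_neg (by omega), List.getElem?_mapIdx, List.getElem?_eq_getElem hLlt]
      simp only [Option.map_some]
      rw [if_pos (by omega)]
    · rw [if_neg hj, List.getElem?_mapIdx, List.getElem?_mapIdx]
      rcases Nat.lt_or_ge j ans.length with hlt | hge
      · rw [List.getElem?_eq_getElem hlt]
        simp only [Option.map_some]
        congr 1
        rw [if_congr (show (j + 1 ≤ L) ↔ (j + 1 ≤ L + 1) by omega) rfl rfl]
      · rw [List.getElem?_eq_none (by omega)]
        simp

-- B's per-class step, pointwise
theorem stepB_eq (ans : List Int) (ls : List Int) (h : ls.length ≤ ans.length) :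
    stepB ans ls = ans.mapIdx (fun j x => x + contrib ls ((j : Int) + 1)) := by
  unfold stepB
  simp only [foldl_pfx, List.nil_append]
  have hlen : (PySem.List.sorted ls (fun x => x) true).length = ls.length :=
    PySem.List.length_sorted ls _ true
  rw [innerB _ (PySem.List.sorted ls (fun x => x) true).length ans (by omega)]
  congr 1
  funext j x
  have hi1 : (1 : Int) ≤ (j : Int) + 1 := by omega
  by_cases hc : j + 1 ≤ (PySem.List.sorted ls (fun x => x) true).length
  · rw [if_pos hc, contrib, if_neg]
    · congr 1
      rw [pyGetD_neg _ _ _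
          (by have := PySem.Int.mod_nonneg ((ls.length : Int)) (b := (j : Int) + 1) (by omega)
              omega)
          (by rw [length_pfx, hlen]
              have hmlt : PySem.Int.mod (ls.length : Int) ((j : Int) + 1) < (j : Int) + 1 :=
                PySem.Int.mod_lt _ (by omega)
              have : ((j : Int) + 1) ≤ (ls.length : Int) := by
                exact_mod_cast (by omega : j + 1 ≤ ls.length)
              omega)]
      congr 1
      have hdm := PySem.Int.floordiv_mul_add_mod (ls.length : Int) ((j : Int) + 1)
      rw [length_pfx, hlen]
      omega
    · rw [cond_iff _ _ (by positivity) hi1]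
      have : j + 1 ≤ ls.length := by omega
      exact not_lt.mpr (by exact_mod_cast this)
  · rw [if_neg hc, contrib, if_pos]
    · ring
    · rw [cond_iff _ _ (by positivity) hi1]
      have : ls.length < j + 1 := by omega
      exact_mod_cast this

-- B's outer loop accumulates all contributions pointwise
theorem foldlB (vs : List (List Int)) :
    ∀ (ans : List Int), (∀ ls ∈ vs, ls.length ≤ ans.length) →
      vs.foldl stepB ans
        = ans.mapIdx (fun j x => x + (vs.map (fun ls => contrib ls ((j : Int) + 1))).sum) := by
  induction vs with
  | nil =>
    intro ans _
    apply List.ext_getElem?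
    intro j
    simp [List.getElem?_mapIdx]
  | cons v t ih =>
    intro ans h
    rw [List.foldl_cons, stepB_eq ans v (h v (List.mem_cons_self ..)),
        ih _ (by intro ls hls; rw [List.length_mapIdx]; exact h ls (List.mem_cons_of_mem _ hls))]
    apply List.ext_getElem?
    intro j
    simp only [List.getElem?_mapIdx, Option.map_map]
    rcases Nat.lt_or_ge j ans.length with hlt | hge
    · rw [List.getElem?_eq_getElem hlt]
      simp
    · rw [List.getElem?_eq_none (by omega)]
      simp

-- A's phase-3 loop produces one total per team size, with the live-set invariant
theorem phase3_loop (D P : PySem.Dict Int (List Int)) (keysl : List Int) :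
    ∀ (m : Nat) (k : Int) (can : PySem.Set Int) (acc : List String), 1 ≤ k →
      can = keysl.filter (fun c => decide (k - 1 ≤ ((D.getD c []).length : Int))) →
      ((PySem.List.pyRange k (k + (m : Int)) 1).foldl (stepA3 D P) (can, acc)).2
        = acc ++ (PySem.List.pyRange k (k + (m : Int)) 1).map (fun i =>
            PySem.Int.toStr ((keysl.map (fun c =>
              if ((D.getD c []).length : Int) < PySem.Int.mod ((D.getD c []).length : Int) i + 1 then 0
              else PySem.List.pyGetD (P.getD c [])
                     (-(PySem.Int.mod ((D.getD c []).length : Int) i + 1)) 0)).sum)) := by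
  intro m
  induction m with
  | zero =>
    intro k can acc _ _
    rw [show k + ((0 : Nat) : Int) = k by norm_num, PySem.List.pyRange_one_eq_nil le_rfl]
    simp
  | succ m ih =>
    intro k can acc hk hcan
    subst hcan
    have hklt : k < k + ((m + 1 : Nat) : Int) := by push_cast; omega
    rw [PySem.List.pyRange_one_cons hklt, List.foldl_cons, List.map_cons]
    -- one pass over `can`: split the (total, del_can) state into its two folds
    have hsplit : (fun (q : Int × PySem.Set Int) c =>
        if ((D.getD c []).length : Int) < PySem.Int.mod ((D.getD c []).length : Int) k + 1 then
          (q.1, PySem.Set.add q.2 c)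
        else
          (q.1 + PySem.List.pyGetD (P.getD c [])
             (-(PySem.Int.mod ((D.getD c []).length : Int) k + 1)) 0, q.2))
        = (fun (q : Int × PySem.Set Int) c =>
          ((fun (t : Int) c =>
             if ((D.getD c []).length : Int) < PySem.Int.mod ((D.getD c []).length : Int) k + 1 then t
             else t + PySem.List.pyGetD (P.getD c [])
               (-(PySem.Int.mod ((D.getD c []).length : Int) k + 1)) 0) q.1 c,
           (fun (s : PySem.Set Int) c =>
             if ((D.getD c []).length : Int) < PySem.Int.mod ((D.getD c []).length : Int) k + 1 then
               PySem.Set.add s c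
             else s) q.2 c)) := by
      funext q c
      beta_reduce
      split <;> rfl
    have htot : (keysl.filter (fun c => decide (k - 1 ≤ ((D.getD c []).length : Int)))).foldl
        (fun (t : Int) c =>
          if ((D.getD c []).length : Int) < PySem.Int.mod ((D.getD c []).length : Int) k + 1 then t
          else t + PySem.List.pyGetD (P.getD c [])
             (-(PySem.Int.mod ((D.getD c []).length : Int) k + 1)) 0) 0
        = (keysl.map (fun c =>
            if ((D.getD c []).length : Int) < PySem.Int.mod ((D.getD c []).length : Int) k + 1 then 0
            else PySem.List.pyGetD (P.getD c [])
                   (-(PySem.Int.mod ((D.getD c []).length : Int) k + 1)) 0)).sum := by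
      have hstep' : (fun (t : Int) c =>
          if ((D.getD c []).length : Int) < PySem.Int.mod ((D.getD c []).length : Int) k + 1 then t
          else t + PySem.List.pyGetD (P.getD c [])
             (-(PySem.Int.mod ((D.getD c []).length : Int) k + 1)) 0)
          = (fun (t : Int) c => t +
              (if ((D.getD c []).length : Int) < PySem.Int.mod ((D.getD c []).length : Int) k + 1 then 0
               else PySem.List.pyGetD (P.getD c [])
                 (-(PySem.Int.mod ((D.getD c []).length : Int) k + 1)) 0)) := by
        funext t c
        split <;> omega
      rw [hstep', PySem.List.foldl_add, zero_add]
      apply sum_filter_ext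
      intro x _ hx
      rw [if_pos]
      rw [cond_iff _ _ (by positivity) (by omega)]
      simp only [decide_eq_false_iff_not, not_le] at hx
      omega
    -- the deletion pass shrinks the live set to the classes with at least k members
    have hcan2 : ((keysl.filter (fun c => decide (k - 1 ≤ ((D.getD c []).length : Int)))).foldl
          (fun (s : PySem.Set Int) c =>
            if ((D.getD c []).length : Int) < PySem.Int.mod ((D.getD c []).length : Int) k + 1 then
              PySem.Set.add s c
            else s) PySem.Set.empty).foldl (fun s d => PySem.Set.discard s d)
          (keysl.filter (fun c => decide (k - 1 ≤ ((D.getD c []).length : Int))))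
        = keysl.filter (fun c => decide (k + 1 - 1 ≤ ((D.getD c []).length : Int))) := by
      rw [foldl_discard, List.filter_filter]
      apply List.filter_congr
      intro x hx
      have hmem : x ∈ ((keysl.filter (fun c => decide (k - 1 ≤ ((D.getD c []).length : Int)))).foldl
          (fun (s : PySem.Set Int) c =>
            if ((D.getD c []).length : Int) < PySem.Int.mod ((D.getD c []).length : Int) k + 1 then
              PySem.Set.add s c
            else s) PySem.Set.empty)
          ↔ x ∈ keysl.filter (fun c => decide (k - 1 ≤ ((D.getD c []).length : Int)))
            ∧ ((D.getD x []).length : Int) < PySem.Int.mod ((D.getD x []).length : Int) k + 1 := by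
        rw [mem_foldl_add_if]
        simp [PySem.Set.empty]
      by_cases hge : k ≤ ((D.getD x []).length : Int)
      · have hcf : List.contains ((keysl.filter (fun c => decide (k - 1 ≤ ((D.getD c []).length : Int)))).foldl
            (fun (s : PySem.Set Int) c =>
              if ((D.getD c []).length : Int) < PySem.Int.mod ((D.getD c []).length : Int) k + 1 then
                PySem.Set.add s c
              else s) PySem.Set.empty) x = false := by
          have hnm : ¬ x ∈ ((keysl.filter (fun c => decide (k - 1 ≤ ((D.getD c []).length : Int)))).foldl
              (fun (s : PySem.Set Int) c =>
                if ((D.getD c []).length : Int) < PySem.Int.mod ((D.getD c []).length : Int) k + 1 then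
                  PySem.Set.add s c
                else s) PySem.Set.empty) := by
            rw [hmem, cond_iff _ _ (by positivity) hk]
            rintro ⟨-, hlt⟩
            omega
          simpa using hnm
        rw [hcf]
        simp only [Bool.not_false, Bool.true_and]
        rw [decide_eq_true (by omega : k - 1 ≤ ((D.getD x []).length : Int)),
            decide_eq_true (by omega : k + 1 - 1 ≤ ((D.getD x []).length : Int))]
      · rw [decide_eq_false (by omega : ¬ (k + 1 - 1 ≤ ((D.getD x []).length : Int)))]
        by_cases hk1 : k - 1 ≤ ((D.getD x []).length : Int)
        · have hmemT : x ∈ ((keysl.filter (fun c => decide (k - 1 ≤ ((D.getD c []).length : Int)))).foldl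
              (fun (s : PySem.Set Int) c =>
                if ((D.getD c []).length : Int) < PySem.Int.mod ((D.getD c []).length : Int) k + 1 then
                  PySem.Set.add s c
                else s) PySem.Set.empty) := by
            rw [hmem]
            refine ⟨List.mem_filter.mpr ⟨hx, by simpa using hk1⟩, ?_⟩
            rw [cond_iff _ _ (by positivity) hk]
            omega
          have hct : List.contains ((keysl.filter (fun c => decide (k - 1 ≤ ((D.getD c []).length : Int)))).foldl
              (fun (s : PySem.Set Int) c =>
                if ((D.getD c []).length : Int) < PySem.Int.mod ((D.getD c []).length : Int) k + 1 then
                  PySem.Set.add s c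
                else s) PySem.Set.empty) x = true := by
            simpa using hmemT
          rw [hct]
          simp
        · rw [decide_eq_false hk1]
          simp
    -- apply the step, then the induction hypothesis at k+1
    have hstepped : stepA3 D P
        (keysl.filter (fun c => decide (k - 1 ≤ ((D.getD c []).length : Int))), acc) k
        = (keysl.filter (fun c => decide (k + 1 - 1 ≤ ((D.getD c []).length : Int))),
           acc ++ [PySem.Int.toStr ((keysl.map (fun c =>
             if ((D.getD c []).length : Int) < PySem.Int.mod ((D.getD c []).length : Int) k + 1 then 0
             else PySem.List.pyGetD (P.getD c [])
                    (-(PySem.Int.mod ((D.getD c []).length : Int) k + 1)) 0)).sum)]) := by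
      simp only [stepA3]
      rw [hsplit, PySem.List.foldl_prod_mk
            (fun (t : Int) c =>
              if ((D.getD c []).length : Int) < PySem.Int.mod ((D.getD c []).length : Int) k + 1 then t
              else t + PySem.List.pyGetD (P.getD c [])
                (-(PySem.Int.mod ((D.getD c []).length : Int) k + 1)) 0)
            (fun (s : PySem.Set Int) c =>
              if ((D.getD c []).length : Int) < PySem.Int.mod ((D.getD c []).length : Int) k + 1 then
                PySem.Set.add s c
              else s)]
      dsimp only
      rw [htot, hcan2]
    rw [hstepped]
    have hnext : k + ((m + 1 : Nat) : Int) = (k + 1) + ((m : Nat) : Int) := by push_cast; ring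
    rw [hnext, ih (k + 1) _ _ (by omega) rfl]
    simp

-- transporting a sum over keys (via getD) to a sum over values
theorem sum_keys_values (d : PySem.Dict Int (List Int)) (g : List Int → Int)
    (hnd : d.keys.Nodup) :
    (d.keys.map (fun c => g (d.getD c []))).sum = (d.values.map g).sum := by
  have h1 : d.keys.map (fun c => g (d.getD c [])) = d.items.map (fun p => g (d.getD p.1 [])) := by
    simp [PySem.Dict.keys, List.map_map, Function.comp]
  have h2 : d.values.map g = d.items.map (fun p => g p.2) := by
    simp [PySem.Dict.values, List.map_map, Function.comp]
  rw [h1, h2]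
  congr 1
  apply List.map_congr_left
  intro p hp
  rw [PySem.Dict.getD_of_mem_items d (by rw [Prod.mk.eta]; exact hp) hnd]

-- ===== VERDICT (by name: the statement is the Claim_ definition above) =====
-- the two grouping folds are the same function; name the pieces once
theorem solve_eq_common (N : Int) (classes ability : List Int) :
    solve N classes ability = solve_alt N classes ability := by
  unfold solve solve_alt
  -- phase 1: split A's (can, data) fold into its two independent folds
  have hsplit1 : (fun (st : PySem.Set Int × PySem.Dict Int (List Int)) i =>
      (PySem.Set.add st.1 (PySem.List.pyGetD classes i 0),
       st.2.modify (PySem.List.pyGetD classes i 0) []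
         (fun l => l ++ [PySem.List.pyGetD ability i 0])))
      = (fun (st : PySem.Set Int × PySem.Dict Int (List Int)) i =>
        ((fun (s : PySem.Set Int) i => PySem.Set.add s (PySem.List.pyGetD classes i 0)) st.1 i,
         (fun (d : PySem.Dict Int (List Int)) i =>
            d.modify (PySem.List.pyGetD classes i 0) []
              (fun l => l ++ [PySem.List.pyGetD ability i 0])) st.2 i)) := rfl
  rw [hsplit1, PySem.List.foldl_prod_mk
        (fun (s : PySem.Set Int) i => PySem.Set.add s (PySem.List.pyGetD classes i 0))
        (fun (d : PySem.Dict Int (List Int)) i =>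
          d.modify (PySem.List.pyGetD classes i 0) []
            (fun l => l ++ [PySem.List.pyGetD ability i 0]))]
  dsimp only
  set d0 := (PySem.List.pyRange 0 N 1).foldl
      (fun (d : PySem.Dict Int (List Int)) i =>
        d.modify (PySem.List.pyGetD classes i 0) []
          (fun l => l ++ [PySem.List.pyGetD ability i 0]))
      PySem.Dict.empty with hd0
  set can0 := (PySem.List.pyRange 0 N 1).foldl
      (fun (s : PySem.Set Int) i => PySem.Set.add s (PySem.List.pyGetD classes i 0))
      PySem.Set.empty with hcan0
  set st2 := d0.keys.foldl
      (fun (st : PySem.Dict Int (List Int) × PySem.Dict Int (List Int)) c =>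
        (st.1.insert c (PySem.List.sorted (st.1.getD c []) (fun x => x) true),
         st.2.insert c (presumOf (PySem.List.sorted (st.1.getD c []) (fun x => x) true))))
      (d0, PySem.Dict.empty) with hst2
  -- the grouping dict, read back
  have h_getD : ∀ c, d0.getD c []
      = (((PySem.List.pyRange 0 N 1).map
           (fun i => (PySem.List.pyGetD classes i 0, PySem.List.pyGetD ability i 0))).filter
          (fun p => p.1 == c)).map (fun p => p.2) := by
    intro c
    have hp : d0 = ((PySem.List.pyRange 0 N 1).map
        (fun i => (PySem.List.pyGetD classes i 0, PySem.List.pyGetD ability i 0))).foldl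
        (fun d p => d.modify p.1 [] (fun l => l ++ [p.2])) PySem.Dict.empty := by
      rw [List.foldl_map]
    rw [hp, PySem.Dict.getD_foldl_modify_append]
    simp
  have h_keys : d0.keys
      = PySem.Set.ofList ((PySem.List.pyRange 0 N 1).map (fun i => PySem.List.pyGetD classes i 0)) := by
    have h := PySem.Dict.keys_foldl_modify_key (PySem.List.pyRange 0 N 1)
      (fun i => PySem.List.pyGetD classes i 0) []
      (fun _ i => (fun l => l ++ [PySem.List.pyGetD ability i 0])) PySem.Dict.empty
    have h' : PySem.Set.update (PySem.Dict.empty (κ := Int) (ν := List Int)).keys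
        ((PySem.List.pyRange 0 N 1).map (fun i => PySem.List.pyGetD classes i 0))
        = PySem.Set.ofList ((PySem.List.pyRange 0 N 1).map (fun i => PySem.List.pyGetD classes i 0)) := by
      rw [show (PySem.Dict.empty (κ := Int) (ν := List Int)).keys = [] from rfl,
          PySem.Set.update_nil_left]
    exact h.trans h'
  have h_nodup : d0.keys.Nodup := by
    rw [h_keys]; exact PySem.Set.nodup_ofList _
  have h_can : can0 = d0.keys := by
    rw [h_keys]
    exact ((PySem.Set.update_nil_left _).symm.trans
      (PySem.Set.update_map_eq_foldl_add (PySem.List.pyRange 0 N 1)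
        (fun i => PySem.List.pyGetD classes i 0) [])).symm
  -- phase 2, read back
  have h2 : ∀ c ∈ d0.keys,
      st2.1.getD c [] = PySem.List.sorted (d0.getD c []) (fun x => x) true
      ∧ st2.2.getD c [] = pfx (PySem.List.sorted (d0.getD c []) (fun x => x) true) 0 := by
    intro c hc
    have h := foldl_insert_read
      (fun l => PySem.List.sorted l (fun x => x) true)
      (fun l => presumOf (PySem.List.sorted l (fun x => x) true))
      d0.keys d0 PySem.Dict.empty h_nodup c
    beta_reduce at h
    rw [← hst2] at h
    exact ⟨h.1.trans (by rw [if_pos hc]), (h.2.trans (by rw [if_pos hc])).trans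
      (by rw [presumOf_eq_pfx])⟩
  -- phase 3 on the A side
  have hinit : can0 = d0.keys.filter
      (fun c => decide ((1 : Int) - 1 ≤ ((st2.1.getD c []).length : Int))) := by
    rw [h_can]
    symm
    apply List.filter_eq_self.mpr
    intro a _
    rw [decide_eq_true_eq]
    omega
  have hrange : PySem.List.pyRange 1 (N + 1) 1
      = PySem.List.pyRange 1 (1 + (N.toNat : Int)) 1 := by
    have hh : (N + 1 - 1).toNat = (1 + (N.toNat : Int) - 1).toNat := by omega
    rw [PySem.List.pyRange_one, PySem.List.pyRange_one, hh]
  rw [hrange, phase3_loop st2.1 st2.2 d0.keys N.toNat 1 can0 [] (by norm_num) hinit]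
  -- the B side: scatter the contributions
  have hvals_len : ∀ ls ∈ d0.values, ls.length ≤ (List.replicate N.toNat (0 : Int)).length := by
    intro ls hls
    rcases List.mem_map.mp hls with ⟨p, hp, rfl⟩
    have hg : d0.getD p.1 [] = p.2 :=
      PySem.Dict.getD_of_mem_items d0 (by rw [Prod.mk.eta]; exact hp) h_nodup []
    rw [List.length_replicate, ← hg, h_getD, List.length_map]
    calc (((PySem.List.pyRange 0 N 1).map
            (fun i => (PySem.List.pyGetD classes i 0, PySem.List.pyGetD ability i 0))).filter
            (fun q => q.1 == p.1)).length
        ≤ ((PySem.List.pyRange 0 N 1).map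
            (fun i => (PySem.List.pyGetD classes i 0, PySem.List.pyGetD ability i 0))).length :=
          List.length_filter_le _ _
      _ ≤ N.toNat := by rw [List.length_map, PySem.List.length_pyRange_one]; omega
  rw [foldlB d0.values (List.replicate N.toNat 0) hvals_len]
  -- assemble: both sides are the same map over team sizes
  congr 1
  apply List.ext_getElem?
  intro j
  rw [PySem.List.pyRange_one]
  rw [List.nil_append, show (1 + (N.toNat : Int) - 1).toNat = N.toNat by omega]
  simp only [List.getElem?_map, List.getElem?_mapIdx, List.getElem?_replicate]
  by_cases hj : j < N.toNat
  · rw [List.getElem?_range hj, if_pos hj]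
    simp only [Option.map_some]
    congr 1
    rw [zero_add, show (1 : Int) + (j : Int) = (j : Int) + 1 by ring]
    rw [← sum_keys_values d0 (fun ls => contrib ls ((j : Int) + 1)) h_nodup]
    congr 1
    congr 1
    apply List.map_congr_left
    intro c hc
    rw [(h2 c hc).1, (h2 c hc).2, PySem.List.length_sorted, contrib]
  · rw [List.getElem?_eq_none (by simpa using Nat.not_lt.mp hj), if_neg hj]
    simp

theorem solve_spec : Claim_equal_solve := by
  intro N classes ability _ _
  show solve N classes ability = solve_alt N classes ability
  exact solve_eq_common N classes ability
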